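-- pv_equiv track=rewrite | github.com/BochengYin/ai-wiki-toolkit | evals/impact/scripts/prepare_variants.py | strip_managed_block
-- ===== SOURCE A (Python) =====
-- START_MARKER = "<!-- aiwiki-toolkit:start -->"
--
-- END_MARKER = "<!-- aiwiki-toolkit:end -->"
--
-- def strip_managed_block(text: str) -> str:
--     lines = text.splitlines()
--     start_index = None
--     end_index = None
--     for index, line in enumerate(lines):
--         if line.strip() == START_MARKER and start_index is None:
--             start_index = index
--             continue
--         if line.strip() == END_MARKER and start_index is not None:
--             end_index = index
--             break
--     if start_index is None or end_index is None or end_index < start_index: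
--         return text
--     kept_lines = lines[:start_index] + lines[end_index + 1 :]
--     stripped = "\n".join(kept_lines).strip()
--     if not stripped:
--         return ""
--     return stripped + "\n"
-- ===== SOURCE B (Python) =====
-- START_MARKER = "<!-- aiwiki-toolkit:start -->"
--
-- END_MARKER = "<!-- aiwiki-toolkit:end -->"
--
--
-- def strip_managed_block(text: str) -> str:
--     seen_start = False
--     seen_end = False
--     kept = []
--     for line in text.splitlines():
--         if not seen_start:
--             if line.strip() == START_MARKER:
--                 seen_start = True
--             else:
--                 kept.append(line)
--         elif not seen_end:
--             if line.strip() == END_MARKER: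
--                 seen_end = True
--         else:
--             kept.append(line)
--     if not (seen_start and seen_end):
--         return text
--     stripped = "\n".join(kept).strip()
--     return stripped + "\n" if stripped else ""
-- ===== Notes on version B (the rewrite author's own statement) =====
-- stated objective: simpler
-- what changed: Replaces A's enumerate-based index hunt plus list slicing by the two found indices with a single flag-driven pass (seen_start/seen_end) that collects the kept lines directly.
import Mathlib
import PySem

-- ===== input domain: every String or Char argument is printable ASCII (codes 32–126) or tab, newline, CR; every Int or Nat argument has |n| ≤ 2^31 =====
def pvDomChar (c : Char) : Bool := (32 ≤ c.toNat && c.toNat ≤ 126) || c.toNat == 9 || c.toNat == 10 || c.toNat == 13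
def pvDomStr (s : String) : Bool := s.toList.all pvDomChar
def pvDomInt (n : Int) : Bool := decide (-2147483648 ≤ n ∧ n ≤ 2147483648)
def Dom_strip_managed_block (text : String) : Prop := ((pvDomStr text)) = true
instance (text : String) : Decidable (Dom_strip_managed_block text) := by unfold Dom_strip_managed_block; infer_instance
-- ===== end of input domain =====

-- B replaces A's index bookkeeping (enumerate + slicing by the two found indices) with a single
-- flag-driven pass that collects the kept lines directly (objective: simpler).

def pvSTART : String := "<!-- aiwiki-toolkit:start -->"
def pvEND : String := "<!-- aiwiki-toolkit:end -->"

-- ===== PORT A =====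
-- the for-loop of A over enumerate(lines): state = start_index; returns (start_index, end_index)
def stripALoop : List (Int × String) → Option Int → Option Int × Option Int
  | [], s => (s, none)
  | (i, l) :: rest, s =>
    if PySem.Str.strip l == pvSTART && s.isNone then
      stripALoop rest (some i)
    else if PySem.Str.strip l == pvEND && !s.isNone then
      (s, some i)
    else
      stripALoop rest s

def strip_managed_block (text : String) : String :=
  let lines := PySem.Str.splitlines text
  match stripALoop (PySem.List.enumerate lines 0) none with
  | (some s, some e) =>
    if e < s then text
    else
      let kept := PySem.List.slice lines none (some s) ++ PySem.List.slice lines (some (e + 1)) none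
      let stripped := PySem.Str.strip (PySem.Str.join "\n" kept)
      if stripped == "" then "" else stripped ++ "\n"
  | _ => text

-- ===== PORT B =====
-- the for-loop of B: flags (seen_start, seen_end) and the kept lines so far
def stripBLoop : List String → Bool → Bool → List String → Bool × Bool × List String
  | [], ss, se, kept => (ss, se, kept)
  | l :: rest, ss, se, kept =>
    if !ss then
      if PySem.Str.strip l == pvSTART then stripBLoop rest true se kept
      else stripBLoop rest ss se (kept ++ [l])
    else if !se then
      if PySem.Str.strip l == pvEND then stripBLoop rest ss true kept
      else stripBLoop rest ss se kept
    else
      stripBLoop rest ss se (kept ++ [l])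

def strip_managed_block_alt (text : String) : String :=
  match stripBLoop (PySem.Str.splitlines text) false false [] with
  | (ss, se, kept) =>
    if ss && se then
      let stripped := PySem.Str.strip (PySem.Str.join "\n" kept)
      if stripped == "" then "" else stripped ++ "\n"
    else text

-- ===== PRECONDITION & SPEC =====
def Spec_strip_managed_block (text : String) (out : String) : Prop := out = strip_managed_block_alt text
instance (text : String) (out : String) : Decidable (Spec_strip_managed_block text out) := by unfold Spec_strip_managed_block; infer_instance

-- ===== CLAIM (what is proved, stated in full; the proofs are below) =====
def Claim_equal_strip_managed_block : Prop := ∀ (text : String), Dom_strip_managed_block text → Spec_strip_managed_block text (strip_managed_block text)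

-- ===== LEMMAS AND PROOFS =====

-- index of the first line whose strip equals m (proof-only helper)
def findMark (m : String) : List String → Option Nat
  | [] => none
  | l :: rest => if PySem.Str.strip l == m then some 0 else (findMark m rest).map (· + 1)

theorem stripALoop_some : ∀ (rest : List String) (k a : Int),
    stripALoop (PySem.List.enumerate rest k) (some a) =
      (some a, (findMark pvEND rest).map (fun j => k + j)) := by
  intro rest
  induction rest with
  | nil => intro k a; simp [PySem.List.enumerate_nil, stripALoop, findMark]
  | cons l rest ih =>
    intro k a
    rw [PySem.List.enumerate_cons]
    by_cases h : PySem.Str.strip l == pvEND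
    · simp [stripALoop, findMark, h]
    · cases hf : findMark pvEND rest <;>
        simp [stripALoop, findMark, h, ih, hf]
      omega

theorem stripBLoop_done : ∀ (rest kept : List String),
    stripBLoop rest true true kept = (true, true, kept ++ rest) := by
  intro rest
  induction rest with
  | nil => intro kept; simp [stripBLoop]
  | cons l rest ih => intro kept; simp [stripBLoop, ih]

theorem stripBLoop_mid : ∀ (rest kept : List String),
    stripBLoop rest true false kept =
      match findMark pvEND rest with
      | none => (true, false, kept)
      | some j => (true, true, kept ++ rest.drop (j + 1)) := by
  intro rest
  induction rest with
  | nil => intro kept; simp [stripBLoop, findMark]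
  | cons l rest ih =>
    intro kept
    by_cases h : PySem.Str.strip l == pvEND
    · simp [stripBLoop, findMark, h, stripBLoop_done]
    · cases hf : findMark pvEND rest <;>
        simp [stripBLoop, findMark, h, ih, hf]

theorem stripALoop_none : ∀ (lines : List String) (k : Int),
    stripALoop (PySem.List.enumerate lines k) none =
      match findMark pvSTART lines with
      | none => (none, none)
      | some i => (some (k + i),
          (findMark pvEND (lines.drop (i + 1))).map (fun j => k + i + 1 + j)) := by
  intro lines
  induction lines with
  | nil => intro k; simp [PySem.List.enumerate_nil, stripALoop, findMark]
  | cons l rest ih =>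
    intro k
    rw [PySem.List.enumerate_cons]
    by_cases h : PySem.Str.strip l == pvSTART
    · simp [stripALoop, findMark, h, stripALoop_some]
    · by_cases h2 : PySem.Str.strip l == pvEND
      · cases hf : findMark pvSTART rest with
        | none => simp [stripALoop, findMark, h, h2, ih, hf]
        | some i =>
          cases hg : findMark pvEND (rest.drop (i + 1)) <;>
            simp [stripALoop, findMark, h, h2, ih, hf, hg] <;> omega
      · cases hf : findMark pvSTART rest with
        | none => simp [stripALoop, findMark, h, h2, ih, hf]
        | some i =>
          cases hg : findMark pvEND (rest.drop (i + 1)) <;>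
            simp [stripALoop, findMark, h, h2, ih, hf, hg] <;> omega

theorem stripBLoop_start : ∀ (lines kept : List String),
    stripBLoop lines false false kept =
      match findMark pvSTART lines with
      | none => (false, false, kept ++ lines)
      | some i =>
        match findMark pvEND (lines.drop (i + 1)) with
        | none => (true, false, kept ++ lines.take i)
        | some j => (true, true, kept ++ lines.take i ++ (lines.drop (i + 1)).drop (j + 1)) := by
  intro lines
  induction lines with
  | nil => intro kept; simp [stripBLoop, findMark]
  | cons l rest ih =>
    intro kept
    by_cases h : PySem.Str.strip l == pvSTART
    · cases hg : findMark pvEND rest <;>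
        simp [stripBLoop, findMark, h, stripBLoop_mid, hg]
    · cases hf : findMark pvSTART rest with
      | none => simp [stripBLoop, findMark, h, ih, hf]
      | some i =>
        cases hg : findMark pvEND (rest.drop (i + 1)) <;>
          simp [stripBLoop, findMark, h, ih, hf, hg]

-- ===== VERDICT (by name: the statement is the Claim_ definition above) =====
theorem strip_managed_block_spec : Claim_equal_strip_managed_block := by
  intro text _
  unfold Spec_strip_managed_block strip_managed_block strip_managed_block_alt
  dsimp only
  rw [stripALoop_none, stripBLoop_start]
  cases hf : findMark pvSTART (PySem.Str.splitlines text) with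
  | none => simp
  | some i =>
    cases hg : findMark pvEND ((PySem.Str.splitlines text).drop (i + 1)) with
    | none => simp [hg]
    | some j =>
      have hlt : ¬ (((i : Nat) : Int) + 1 + j < i) := by omega
      have h2 : ((i : Nat) : Int) + 1 + j + 1 = ((i + 1 + (j + 1) : Nat) : Int) := by push_cast; ring
      dsimp only
      simp only [hg, Option.bind_eq_bind, Option.bind_some, Option.pure_def, Option.map_some,
        zero_add]
      rw [if_neg hlt, h2]
      rw [PySem.List.slice_to_natCast, PySem.List.slice_from_natCast]
      simp [List.drop_drop]
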